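-- pv_equiv track=rewrite | github.com/vhictor05/Proyecto-3_Programacion_III | trabajo_modulado/visual/grafo_viz.py | asignar_etiquetas_cortas
-- ===== SOURCE A (Python) =====
-- def asignar_etiquetas_cortas(nodos_ids):
--     """
--     Dado un listado de nodos IDs, asigna etiquetas tipo letras Excel A, B, ..., Z, AA, AB,...
--     Retorna diccionario: nodo_id -> etiqueta_corta
--     """
--     def numero_a_letras(num):
--         letras = ""
--         while num > 0:
--             num -= 1
--             letras = chr(ord('A') + (num % 26)) + letras
--             num //= 26
--         return letras
--
--     etiquetas = {}
--     for i, nodo in enumerate(sorted(nodos_ids), start=1):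
--         etiquetas[nodo] = numero_a_letras(i)
--     return etiquetas
--
--     add_edges(root)
--     return G
-- ===== SOURCE B (Python) =====
-- def _bump(rev):
--     # Excel-style increment of a label stored least-significant-char first.
--     if not rev:
--         return ['A']
--     if rev[0] == 'Z':
--         return ['A'] + _bump(rev[1:])
--     return [chr(ord(rev[0]) + 1)] + rev[1:]
--
--
-- def asignar_etiquetas_cortas(nodos_ids):
--     etiquetas = {}
--     rev = []  # running label, least-significant char first; starts "before A"
--     for nodo in sorted(nodos_ids):
--         rev = _bump(rev)
--         etiquetas[nodo] = ''.join(reversed(rev))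
--     return etiquetas
-- ===== Notes on version B (the rewrite author's own statement) =====
-- stated objective: alternative
-- what changed: Replaced the per-index bijective base-26 conversion (a division loop run independently for every node) with a single running label that is incremented Excel-style with carry once per node.
import Mathlib
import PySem

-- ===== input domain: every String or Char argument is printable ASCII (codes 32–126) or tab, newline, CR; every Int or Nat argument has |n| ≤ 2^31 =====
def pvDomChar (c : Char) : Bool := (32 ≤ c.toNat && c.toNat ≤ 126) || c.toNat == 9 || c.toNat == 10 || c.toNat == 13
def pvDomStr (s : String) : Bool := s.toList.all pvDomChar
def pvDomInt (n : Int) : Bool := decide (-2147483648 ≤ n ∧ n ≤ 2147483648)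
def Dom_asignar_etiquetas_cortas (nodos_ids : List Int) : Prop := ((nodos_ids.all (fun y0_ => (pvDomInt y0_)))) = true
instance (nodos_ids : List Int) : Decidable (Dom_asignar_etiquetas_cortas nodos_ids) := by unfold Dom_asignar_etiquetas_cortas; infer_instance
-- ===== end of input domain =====

-- B replaces A's independent per-index base-26 conversion with one running Excel-style
-- label incremented (with carry) per node — an alternative decomposition, same cost class.


-- ===== PORT A =====
-- 'while num > 0: num -= 1; letras = chr(ord('A') + num % 26) + letras; num //= 26'
def pvNumLetras (num : Int) (letras : List Char) : List Char :=
  if _h : 0 < num then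
    pvNumLetras (PySem.Int.floordiv (num - 1) 26)
      (Char.ofNat ('A'.toNat + (PySem.Int.mod (num - 1) 26).toNat) :: letras)
  else letras
termination_by num.toNat
decreasing_by
  have h1 : PySem.Int.floordiv (num - 1) 26 = (num - 1) / 26 :=
    PySem.Int.floordiv_eq_ediv_of_pos (by norm_num)
  have h2 : (num - 1) / 26 ≤ num - 1 := Int.ediv_le_self _ (by omega)
  have h3 : 0 ≤ (num - 1) / 26 := Int.ediv_nonneg (by omega) (by norm_num)
  omega

def asignar_etiquetas_cortas (nodos_ids : List Int) : List (Int × String) :=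
  ((PySem.List.enumerate (PySem.List.sorted nodos_ids (fun x => x) false) 1).foldl
      (fun (d : PySem.Dict Int String) (p : Int × Int) =>
        d.insert p.2 (String.ofList (pvNumLetras p.1 [])))
      PySem.Dict.empty).items

-- ===== PORT B =====
-- helper _bump: Excel-style increment of the label stored least-significant char first
def pvBump : List Char → List Char
  | [] => ['A']
  | c :: rest => if c = 'Z' then 'A' :: pvBump rest else Char.ofNat (c.toNat + 1) :: rest

def asignar_etiquetas_cortas_alt (nodos_ids : List Int) : List (Int × String) :=
  (((PySem.List.sorted nodos_ids (fun x => x) false).foldl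
      (fun (st : List Char × PySem.Dict Int String) nodo =>
        let rev := pvBump st.1
        (rev, st.2.insert nodo (String.ofList rev.reverse)))
      ([], PySem.Dict.empty)).2).items

-- ===== PRECONDITION & SPEC =====
def Spec_asignar_etiquetas_cortas (nodos_ids : List Int) (out : List (Int × String)) : Prop := out = asignar_etiquetas_cortas_alt nodos_ids
instance (nodos_ids : List Int) (out : List (Int × String)) : Decidable (Spec_asignar_etiquetas_cortas nodos_ids out) := by unfold Spec_asignar_etiquetas_cortas; infer_instance

-- ===== CLAIM (what is proved, stated in full; the proofs are below) =====
def Claim_equal_asignar_etiquetas_cortas : Prop := ∀ (nodos_ids : List Int), Dom_asignar_etiquetas_cortas nodos_ids → Spec_asignar_etiquetas_cortas nodos_ids (asignar_etiquetas_cortas nodos_ids)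

-- ===== LEMMAS AND PROOFS =====

-- the label of rank n (bijective base 26), least-significant char first
def repRev : Nat → List Char
  | 0 => []
  | n + 1 => Char.ofNat ('A'.toNat + n % 26) :: repRev (n / 26)
decreasing_by omega

theorem bump_repRev : ∀ n : Nat, pvBump (repRev n) = repRev (n + 1) := by
  intro n
  induction n using Nat.strong_induction_on with
  | _ n ih =>
    match n with
    | 0 =>
      simp [repRev, pvBump]
    | m + 1 =>
      have hR : repRev (m + 1 + 1) = Char.ofNat ('A'.toNat + (m + 1) % 26) :: repRev ((m + 1) / 26) := by
        rw [repRev]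
      rw [repRev, pvBump, hR]
      by_cases hz : m % 26 = 25
      · have h1 : Char.ofNat ('A'.toNat + m % 26) = 'Z' := by rw [hz]; decide
        have h2 : (m + 1) % 26 = 0 := by omega
        have h3 : (m + 1) / 26 = m / 26 + 1 := by omega
        rw [if_pos h1, ih (m / 26) (by omega), h2, h3]
        congr 1
      · have hlt : m % 26 < 25 := by omega
        have h2 : (m + 1) % 26 = m % 26 + 1 := by omega
        have h3 : (m + 1) / 26 = m / 26 := by omega
        rw [h2, h3]
        set r := m % 26 with hr
        have h1 : ¬ (Char.ofNat ('A'.toNat + r) = 'Z') := by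
          interval_cases r <;> decide
        rw [if_neg h1]
        have h4 : Char.ofNat ((Char.ofNat ('A'.toNat + r)).toNat + 1) = Char.ofNat ('A'.toNat + (r + 1)) := by
          interval_cases r <;> decide
        rw [h4]

theorem numLetras_repRev : ∀ (n : Nat) (acc : List Char),
    pvNumLetras (n : Int) acc = (repRev n).reverse ++ acc := by
  intro n
  induction n using Nat.strong_induction_on with
  | _ n ih =>
    intro acc
    match n with
    | 0 => rw [pvNumLetras]; simp [repRev]
    | m + 1 =>
      rw [pvNumLetras]
      have hpos : (0 : Int) < ((m + 1 : Nat) : Int) := by exact_mod_cast Nat.succ_pos m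
      rw [dif_pos hpos]
      have he : ((m + 1 : Nat) : Int) - 1 = (m : Int) := by push_cast; ring
      have hd : PySem.Int.floordiv (m : Int) 26 = ((m / 26 : Nat) : Int) := by
        exact_mod_cast PySem.Int.floordiv_natCast m 26
      have hm : PySem.Int.mod (m : Int) 26 = ((m % 26 : Nat) : Int) := by
        exact_mod_cast PySem.Int.mod_natCast m 26
      rw [he, hd, hm, ih (m / 26) (by omega)]
      rw [repRev]
      have hc : ((m % 26 : Nat) : Int).toNat = m % 26 := by omega
      rw [hc]
      simp

theorem loop_eq : ∀ (xs : List Int) (k : Nat) (d : PySem.Dict Int String),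
    (PySem.List.enumerate xs ((k : Int) + 1)).foldl
      (fun (d : PySem.Dict Int String) (p : Int × Int) =>
        d.insert p.2 (String.ofList (pvNumLetras p.1 []))) d
    = (xs.foldl
        (fun (st : List Char × PySem.Dict Int String) nodo =>
          let rev := pvBump st.1
          (rev, st.2.insert nodo (String.ofList rev.reverse)))
        (repRev k, d)).2 := by
  intro xs
  induction xs with
  | nil => intro k d; simp [PySem.List.enumerate_nil]
  | cons x xs ih =>
    intro k d
    rw [PySem.List.enumerate_cons, List.foldl_cons, List.foldl_cons]
    show (PySem.List.enumerate xs ((k : Int) + 1 + 1)).foldl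
        (fun (d : PySem.Dict Int String) (p : Int × Int) =>
          d.insert p.2 (String.ofList (pvNumLetras p.1 [])))
        (d.insert x (String.ofList (pvNumLetras ((k : Int) + 1) [])))
      = (xs.foldl
          (fun (st : List Char × PySem.Dict Int String) nodo =>
            let rev := pvBump st.1
            (rev, st.2.insert nodo (String.ofList rev.reverse)))
          (pvBump (repRev k), d.insert x (String.ofList (pvBump (repRev k)).reverse))).2
    rw [bump_repRev]
    have hl : pvNumLetras ((k : Int) + 1) [] = (repRev (k + 1)).reverse := by
      have hcast : ((k : Int) + 1) = ((k + 1 : Nat) : Int) := by push_cast; ring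
      rw [hcast, numLetras_repRev]; simp
    have hk : (k : Int) + 1 + 1 = ((k + 1 : Nat) : Int) + 1 := by push_cast; ring
    rw [hl, hk, ih (k + 1)]

-- ===== VERDICT (by name: the statement is the Claim_ definition above) =====
theorem asignar_etiquetas_cortas_spec : Claim_equal_asignar_etiquetas_cortas := by
  intro nodos_ids _
  unfold Spec_asignar_etiquetas_cortas asignar_etiquetas_cortas asignar_etiquetas_cortas_alt
  have h := loop_eq (PySem.List.sorted nodos_ids (fun x => x) false) 0 PySem.Dict.empty
  rw [show repRev 0 = [] from by rw [repRev]] at h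
  simp only [Nat.cast_zero, zero_add] at h
  rw [h]
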